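-- pv_equiv track=rewrite | github.com/JayJayTii/BlindBase | src/assets/recommendations/GenerateRecommendations.py | CleanRecommendation
-- ===== SOURCE A (Python) =====
-- def CleanRecommendation(unclean):
--     out = ""
--     capitalise = False
--     while(len(unclean) > 0):
--         if(unclean[0] != "<"):
--             out += unclean[0].upper() if(capitalise) else unclean[0].lower()
--             unclean = unclean[1:]
--             continue
--         #Now there's a tag
--         capitalise = not (unclean[1] == "/")
--         unclean = unclean[unclean.index(">")+1:]
--
--     return out
-- ===== SOURCE B (Python) =====
-- def CleanRecommendation(unclean):
--     out = []
--     mode = 0  # 0 = text, 1 = first char inside a tag, 2 = rest of a tag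
--     capitalise = False
--     for c in unclean:
--         if mode == 0:
--             if c == "<":
--                 mode = 1
--             else:
--                 out.append(c.upper() if capitalise else c.lower())
--         elif mode == 1:
--             capitalise = c != "/"
--             mode = 0 if c == ">" else 2
--         else:
--             if c == ">":
--                 mode = 0
--     return "".join(out)
-- ===== Notes on version B (the rewrite author's own statement) =====
-- stated objective: faster
-- what changed: B replaces A's while loop that re-slices the remaining string each step and looks ahead with index('>') by a single left-to-right fold with a 3-state automaton (text / first-tag-char / rest-of-tag), appending cased characters to a list joined once at the end.
import Mathlib
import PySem

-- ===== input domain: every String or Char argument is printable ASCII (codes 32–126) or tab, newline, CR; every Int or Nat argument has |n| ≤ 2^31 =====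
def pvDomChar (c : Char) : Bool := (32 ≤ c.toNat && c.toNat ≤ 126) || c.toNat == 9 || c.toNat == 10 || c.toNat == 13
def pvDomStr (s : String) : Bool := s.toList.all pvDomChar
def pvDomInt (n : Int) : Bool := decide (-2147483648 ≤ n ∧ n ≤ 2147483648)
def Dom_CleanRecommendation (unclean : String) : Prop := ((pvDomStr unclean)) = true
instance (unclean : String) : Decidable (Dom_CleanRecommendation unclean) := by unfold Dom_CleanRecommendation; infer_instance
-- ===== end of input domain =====

-- B replaces A's while loop (re-slicing the remainder and looking ahead with index('>')) by a
-- single fold with a 3-state automaton and no lookahead; objective: faster (linear, no re-slicing).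

-- ===== PORT A =====
-- A's while loop: state (unclean, capitalise, out); one character or one whole tag consumed per step.
-- Where Python raises (IndexError on a trailing '<', ValueError when '>' is missing) the port
-- returns the accumulated output; Pre_ excludes exactly those inputs.
def CleanRecommendationLoop (l : List Char) (cap : Bool) (out : List Char) : List Char :=
  match l with
  | [] => out
  | c :: rest =>
    if c ≠ '<' then
      CleanRecommendationLoop rest cap
        (out ++ [if cap then PySem.Chars.upperChar c else PySem.Chars.lowerChar c])
    else
      match rest with
      | [] => out  -- Python: IndexError on unclean[1]
      | d :: t =>
        match PySem.List.index? (c :: d :: t) '>' with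
        | none => out  -- Python: ValueError from unclean.index(">")
        | some k => CleanRecommendationLoop ((c :: d :: t).drop (k + 1)) (!(d == '/')) out
termination_by l.length
decreasing_by
  · simp
  · simp

def CleanRecommendation (unclean : String) : String :=
  String.ofList (CleanRecommendationLoop unclean.toList false [])

-- ===== PORT B =====
-- Source B's for-loop body: one step of the automaton; state = (mode, capitalise, out).
def CleanRecommendationAltStep (st : Nat × Bool × List Char) (c : Char) : Nat × Bool × List Char :=
  match st with
  | (mode, cap, out) =>
    if mode = 0 then
      if c = '<' then (1, cap, out)
      else (0, cap, out ++ [if cap then PySem.Chars.upperChar c else PySem.Chars.lowerChar c])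
    else if mode = 1 then
      (if c = '>' then 0 else 2, c != '/', out)
    else
      if c = '>' then (0, cap, out) else (2, cap, out)

def CleanRecommendation_alt (unclean : String) : String :=
  String.ofList (unclean.toList.foldl CleanRecommendationAltStep (0, false, [])).2.2

-- ===== PRECONDITION & SPEC =====
-- Pre_ holds exactly when Python A returns: every '<' has a following character (else IndexError)
-- and some '>' after it (else ValueError).
def Pre_CleanRecommendation (unclean : String) : Prop :=
  ∀ i, (h : i < unclean.toList.length) → unclean.toList[i] = '<' →
    i + 1 < unclean.toList.length ∧ '>' ∈ unclean.toList.drop (i + 1)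
instance (unclean : String) : Decidable (Pre_CleanRecommendation unclean) := by
  unfold Pre_CleanRecommendation; infer_instance

def pvWitness_CleanRecommendation : String := "<b>Hi</b> there"

def Spec_CleanRecommendation (unclean : String) (out : String) : Prop := out = CleanRecommendation_alt unclean
instance (unclean : String) (out : String) : Decidable (Spec_CleanRecommendation unclean out) := by unfold Spec_CleanRecommendation; infer_instance

-- ===== CLAIM (what is proved, stated in full; the proofs are below) =====
def Claim_equal_CleanRecommendation : Prop := ∀ (unclean : String), Dom_CleanRecommendation unclean → Pre_CleanRecommendation unclean → Spec_CleanRecommendation unclean (CleanRecommendation unclean)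

-- ===== LEMMAS AND PROOFS =====

-- The part of Pre_ the induction needs, as a predicate on the remaining character list.
def CleanTagsOk (l : List Char) : Prop :=
  ∀ i, (h : i < l.length) → l[i] = '<' → '>' ∈ l.drop (i + 1)

theorem cleanTagsOk_tail (c : Char) (l : List Char) (h : CleanTagsOk (c :: l)) :
    CleanTagsOk l := by
  intro i hi hlt
  have := h (i + 1) (by simpa using Nat.succ_lt_succ hi) (by simpa using hlt)
  simpa using this

theorem cleanTagsOk_drop (m : Nat) (l : List Char) (h : CleanTagsOk l) :
    CleanTagsOk (l.drop m) := by
  induction m with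
  | zero => simpa using h
  | succ n ih =>
    have : l.drop (n + 1) = (l.drop n).tail := by
      rw [← List.drop_drop]; simp
    rw [this]
    cases hd : l.drop n with
    | nil => intro i hi _; simp at hi
    | cons c t => exact cleanTagsOk_tail c t (hd ▸ ih)

-- In mode 2 the automaton skips to just past the first '>'.
theorem altStep_mode2_skip : ∀ (l : List Char) (k : Nat), List.idxOf? '>' l = some k →
    ∀ (cap : Bool) (out : List Char),
    l.foldl CleanRecommendationAltStep (2, cap, out) =
      (l.drop (k + 1)).foldl CleanRecommendationAltStep (0, cap, out) := by
  intro l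
  induction l with
  | nil => intro k hk; simp [List.idxOf?] at hk
  | cons c t ih =>
    intro k hk cap out
    by_cases hc : c = '>'
    · subst hc
      have : k = 0 := by simp [List.idxOf?_cons] at hk; omega
      subst this
      simp [List.foldl_cons, CleanRecommendationAltStep]
    · have hk' : ∃ m, List.idxOf? '>' t = some m ∧ k = m + 1 := by
        rw [List.idxOf?_cons] at hk
        simp [hc] at hk
        rcases hk with ⟨m, hm, hkm⟩
        exact ⟨m, hm, hkm.symm⟩
      rcases hk' with ⟨m, hm, hkm⟩
      subst hkm
      simp only [List.foldl_cons]
      have hstep : CleanRecommendationAltStep (2, cap, out) c = (2, cap, out) := by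
        simp [CleanRecommendationAltStep, hc]
      rw [hstep, ih m hm, List.drop_succ_cons]

-- The two loops agree from any common state, given well-formed tags.
theorem loop_eq_fold (n : Nat) : ∀ (l : List Char), l.length ≤ n → CleanTagsOk l →
    ∀ (cap : Bool) (out : List Char),
    CleanRecommendationLoop l cap out =
      (l.foldl CleanRecommendationAltStep (0, cap, out)).2.2 := by
  induction n with
  | zero =>
    intro l hl _ cap out
    match l with
    | [] => simp [CleanRecommendationLoop]
    | c :: rest => simp at hl
  | succ n ih =>
    intro l hl hok cap out
    match l with
    | [] => simp [CleanRecommendationLoop]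
    | c :: rest =>
      by_cases hc : c = '<'
      · subst hc
        have hgt : '>' ∈ rest := by simpa using hok 0 (by simp) rfl
        match rest, hgt with
        | d :: t, hgt =>
          rw [CleanRecommendationLoop.eq_def]
          simp only [ne_eq, not_true_eq_false, if_false]
          have hmem : '>' ∈ '<' :: d :: t := List.mem_cons_of_mem _ hgt
          have hsome := List.isSome_idxOf?.mpr hmem
          rcases Option.isSome_iff_exists.mp hsome with ⟨k, hk⟩
          have hk1 : ∃ m, List.idxOf? '>' (d :: t) = some m ∧ k = m + 1 := by
            rw [List.idxOf?_cons] at hk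
            simp at hk
            rcases hk with ⟨m, hm, hkm⟩
            exact ⟨m, hm, hkm.symm⟩
          rcases hk1 with ⟨m, hm, hkm⟩
          subst hkm
          simp only [PySem.List.index?_eq_idxOf?, hk]
          rw [List.drop_succ_cons]
          -- B side: '<' enters mode 1, d sets the flag and the mode
          simp only [List.foldl_cons]
          have h1 : CleanRecommendationAltStep (0, cap, out) '<' = (1, cap, out) := by
            simp [CleanRecommendationAltStep]
          rw [h1]
          have h2 : CleanRecommendationAltStep (1, cap, out) d =
              (if d = '>' then 0 else 2, d != '/', out) := by
            simp [CleanRecommendationAltStep]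
          rw [h2]
          have hokd : CleanTagsOk ((d :: t).drop (m + 1)) :=
            cleanTagsOk_drop (m + 1) (d :: t)
              (cleanTagsOk_tail _ _ hok)
          by_cases hd : d = '>'
          · subst hd
            have hm0 : m = 0 := by simp [List.idxOf?_cons] at hm; omega
            subst hm0
            simp only [List.drop_succ_cons, List.drop_zero]
            have hcap : ('>' != '/') = !('>' == '/') := rfl
            rw [← hcap] at *
            exact ih t (by simp at hl; omega) (by simpa using hokd) _ out
          · have hm' : ∃ m', List.idxOf? '>' t = some m' ∧ m = m' + 1 := by
              rw [List.idxOf?_cons] at hm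
              simp [hd] at hm
              rcases hm with ⟨m', hm', hmm⟩
              exact ⟨m', hm', hmm.symm⟩
            rcases hm' with ⟨m', hm', hmm⟩
            subst hmm
            simp only [if_neg hd]
            rw [altStep_mode2_skip t m' hm']
            have hlen : (t.drop (m' + 1)).length ≤ n := by
              have : (t.drop (m' + 1)).length = t.length - (m' + 1) := List.length_drop
              simp at hl
              omega
            have := ih (t.drop (m' + 1)) hlen (by
              have : CleanTagsOk ((d :: t).drop (m' + 1 + 1)) := hokd
              simpa using this) (d != '/') out
            rw [List.drop_succ_cons] at *
            simpa [bne] using this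
      · rw [CleanRecommendationLoop.eq_def]
        simp only [ne_eq, hc, not_false_eq_true, if_true, List.foldl_cons]
        have hstep : CleanRecommendationAltStep (0, cap, out) c =
            (0, cap, out ++ [if cap then PySem.Chars.upperChar c else PySem.Chars.lowerChar c]) := by
          simp [CleanRecommendationAltStep, hc]
        rw [hstep]
        exact ih rest (by simp at hl; omega) (cleanTagsOk_tail _ _ hok) cap _

-- ===== VERDICT (by name: the statement is the Claim_ definition above) =====
theorem CleanRecommendation_spec : Claim_equal_CleanRecommendation := by
  intro s _ hpre
  unfold Spec_CleanRecommendation CleanRecommendation CleanRecommendation_alt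
  rw [loop_eq_fold s.toList.length s.toList le_rfl]
  intro i hi hlt
  exact (hpre i hi hlt).2
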